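-- pv_equiv track=rewrite | github.com/Krisje1973/AdventOfCode | AOCHelper.py | get_arrays_from_separator
-- ===== SOURCE A (Python) =====
-- def get_arrays_from_separator(lines,separator):
--   # Reads all lines and creates array for each seperator found (mostly blanc line)
--   arrays = []
--   lineid = 0
--
--   while lineid < len(lines):
--       arr = []
--       while lineid < len(lines) and lines[lineid]:
--           if lines[lineid]==separator: break
--           arr.append(lines[lineid].strip())
--           lineid += 1
--       lineid += 1
--       arrays.append(arr)
--
--   return arrays
-- ===== SOURCE B (Python) =====
-- def get_arrays_from_separator(lines, separator):
--     # Single pass with an accumulator and a 'started' flag instead of nested index loops.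
--     arrays = []
--     current = []
--     started = False
--     for line in lines:
--         if not line or line == separator:
--             arrays.append(current)
--             current = []
--             started = False
--         else:
--             current.append(line.strip())
--             started = True
--     if started:
--         arrays.append(current)
--     return arrays
-- ===== Notes on version B (the rewrite author's own statement) =====
-- stated objective: simpler
-- what changed: Replaced the nested while/index structure (inner scan to the next boundary with manual index bookkeeping) by a single flat for-loop over the lines with a current-group accumulator and a started flag, appending the last group only if started.
import Mathlib
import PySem

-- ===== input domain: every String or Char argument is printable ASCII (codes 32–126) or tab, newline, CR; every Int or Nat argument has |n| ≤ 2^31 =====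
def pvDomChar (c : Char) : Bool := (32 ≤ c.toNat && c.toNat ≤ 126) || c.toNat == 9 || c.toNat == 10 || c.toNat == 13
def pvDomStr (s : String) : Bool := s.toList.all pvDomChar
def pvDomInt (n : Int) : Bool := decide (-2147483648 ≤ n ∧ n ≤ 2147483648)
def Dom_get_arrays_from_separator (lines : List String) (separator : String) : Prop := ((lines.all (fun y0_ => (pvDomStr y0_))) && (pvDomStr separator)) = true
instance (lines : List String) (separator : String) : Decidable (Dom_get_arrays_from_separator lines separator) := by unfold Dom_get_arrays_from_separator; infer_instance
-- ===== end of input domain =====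

-- B is a flat single pass with a current-group accumulator and a started flag,
-- replacing A's nested while/index structure; same return value, same O(n) cost.

-- ===== PORT A =====
-- inner 'while lineid < len(lines) and lines[lineid]: if == separator: break; arr.append(strip); lineid += 1'
def pvInnerA (lines : List String) (separator : String) (lineid : Nat)
    (arr : List String) : List String × Nat :=
  match h : lines[lineid]? with
  | none => (arr, lineid)
  | some l =>
    if l = "" then (arr, lineid)
    else if l = separator then (arr, lineid)
    else pvInnerA lines separator (lineid + 1) (arr ++ [PySem.Str.strip l])
termination_by lines.length - lineid
decreasing_by
  have hlt : lineid < lines.length := (List.getElem?_eq_some_iff.mp h).1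
  omega

-- outer 'while lineid < len(lines): arr = []; <inner>; lineid += 1; arrays.append(arr)'
-- (fuel-driven structural recursion: the index strictly increases each iteration, so
--  lines.length steps of fuel always suffice; the fuel only makes the loop total)
def pvOuterA (lines : List String) (separator : String) (fuel : Nat) (lineid : Nat)
    (arrays : List (List String)) : List (List String) :=
  match fuel with
  | 0 => arrays
  | fuel + 1 =>
    if lineid < lines.length then
      let r := pvInnerA lines separator lineid []
      pvOuterA lines separator fuel (r.2 + 1) (arrays ++ [r.1])
    else arrays

def get_arrays_from_separator (lines : List String) (separator : String) : List (List String) :=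
  pvOuterA lines separator lines.length 0 []

-- ===== PORT B =====
-- one step of the for-loop: state = (arrays, current, started)
def pvStepB (separator : String) (st : List (List String) × List String × Bool)
    (line : String) : List (List String) × List String × Bool :=
  if line = "" ∨ line = separator then (st.1 ++ [st.2.1], [], false)
  else (st.1, st.2.1 ++ [PySem.Str.strip line], true)

def get_arrays_from_separator_alt (lines : List String) (separator : String) : List (List String) :=
  let st := lines.foldl (pvStepB separator) ([], [], false)
  if st.2.2 then st.1 ++ [st.2.1] else st.1

-- ===== PRECONDITION & SPEC =====
def Spec_get_arrays_from_separator (lines : List String) (separator : String) (out : List (List String)) : Prop := out = get_arrays_from_separator_alt lines separator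
instance (lines : List String) (separator : String) (out : List (List String)) : Decidable (Spec_get_arrays_from_separator lines separator out) := by unfold Spec_get_arrays_from_separator; infer_instance

-- ===== CLAIM (what is proved, stated in full; the proofs are below) =====
def Claim_equal_get_arrays_from_separator : Prop := ∀ (lines : List String) (separator : String), Dom_get_arrays_from_separator lines separator → Spec_get_arrays_from_separator lines separator (get_arrays_from_separator lines separator)

-- ===== LEMMAS AND PROOFS =====

-- the inner loop never moves the index backwards
theorem pvInnerA_ge (lines : List String) (separator : String) (lineid : Nat)
    (arr : List String) : lineid ≤ (pvInnerA lines separator lineid arr).2 := by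
  induction lineid, arr using pvInnerA.induct lines separator with
  | case1 i arr h => rw [pvInnerA, h]
  | case2 i arr h => rw [pvInnerA, h]; simp
  | case3 i arr h h1 => rw [pvInnerA, h]; simp [h1]
  | case4 i arr l h h1 h2 ih =>
    rw [pvInnerA, h]
    simp only [if_neg h1, if_neg h2]
    omega

-- a line is 'kept' (neither falsy nor the separator)
def pvKeep (separator l : String) : Bool := !(l == "" || l == separator)

-- common recursive specification: groups of stripped kept lines between boundaries,
-- no trailing empty group
def pvGroups (separator : String) : List String → List (List String)
  | [] => []
  | l :: ls =>
    let t := (l :: ls).takeWhile (pvKeep separator)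
    (t.map PySem.Str.strip) :: pvGroups separator (((l :: ls).drop t.length).drop 1)
termination_by ls => ls.length
decreasing_by
  simp only [List.length_drop, List.length_cons]
  omega

theorem pvGroups_cons (separator l : String) (ls : List String) :
    pvGroups separator (l :: ls) =
      ((l :: ls).takeWhile (pvKeep separator)).map PySem.Str.strip ::
        pvGroups separator (((l :: ls).drop ((l :: ls).takeWhile (pvKeep separator)).length).drop 1) := by
  rw [pvGroups]

-- A's inner loop computes the stripped takeWhile of the suffix and advances the index by its length
theorem pvInnerA_eq (lines : List String) (separator : String) (lineid : Nat) (arr : List String) :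
    pvInnerA lines separator lineid arr =
      (arr ++ ((lines.drop lineid).takeWhile (pvKeep separator)).map PySem.Str.strip,
       lineid + ((lines.drop lineid).takeWhile (pvKeep separator)).length) := by
  induction lineid, arr using pvInnerA.induct lines separator with
  | case1 i arr h =>
    have hge : lines.length ≤ i := by
      by_contra hc
      simp [List.getElem?_eq_getElem (by omega : i < lines.length)] at h
    rw [pvInnerA, h]
    simp [List.drop_eq_nil_of_le hge]
  | case2 i arr h =>
    have hi : i < lines.length := by
      by_contra hc
      simp [List.getElem?_eq_none (by omega : lines.length ≤ i)] at h
    have hd : lines.drop i = "" :: lines.drop (i + 1) := by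
      rw [List.drop_eq_getElem_cons hi]
      simp [List.getElem?_eq_getElem hi] at h
      simp [h]
    rw [pvInnerA, h]
    simp [hd, List.takeWhile_cons, pvKeep]
  | case3 i arr h h1 =>
    have hi : i < lines.length := by
      by_contra hc
      simp [List.getElem?_eq_none (by omega : lines.length ≤ i)] at h
    have hd : lines.drop i = separator :: lines.drop (i + 1) := by
      rw [List.drop_eq_getElem_cons hi]
      simp [List.getElem?_eq_getElem hi] at h
      simp [h]
    rw [pvInnerA, h]
    simp [h1, hd, List.takeWhile_cons, pvKeep]
  | case4 i arr l h h1 h2 ih =>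
    have hi : i < lines.length := by
      by_contra hc
      simp [List.getElem?_eq_none (by omega : lines.length ≤ i)] at h
    have hd : lines.drop i = l :: lines.drop (i + 1) := by
      rw [List.drop_eq_getElem_cons hi]
      simp [List.getElem?_eq_getElem hi] at h
      simp [h]
    rw [pvInnerA, h]
    simp only [if_neg h1, if_neg h2, ih, hd, List.takeWhile_cons, pvKeep]
    simp [h1, h2, List.append_assoc]
    omega

-- A's outer loop appends the groups of the remaining suffix whenever the fuel suffices
theorem pvOuterA_eq (lines : List String) (separator : String) (fuel lineid : Nat)
    (arrays : List (List String)) (hf : lines.length - lineid ≤ fuel) :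
    pvOuterA lines separator fuel lineid arrays
      = arrays ++ pvGroups separator (lines.drop lineid) := by
  induction fuel generalizing lineid arrays with
  | zero =>
    have h0 : lines.drop lineid = [] := List.drop_eq_nil_of_le (by omega)
    rw [pvOuterA, h0, pvGroups]
    simp
  | succ fuel ih =>
    rw [pvOuterA]
    by_cases h : lineid < lines.length
    · rw [if_pos h, pvInnerA_eq]
      have hd : lines.drop lineid ≠ [] := by
        simp [List.drop_eq_nil_iff]; omega
      obtain ⟨l, ls, hcons⟩ := List.exists_cons_of_ne_nil hd
      have hge := pvInnerA_ge lines separator lineid []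
      rw [pvInnerA_eq] at hge
      rw [ih _ _ (by omega)]
      rw [hcons, pvGroups_cons, ← hcons]
      have hdd : lines.drop (lineid + ((lines.drop lineid).takeWhile (pvKeep separator)).length + 1)
          = ((lines.drop lineid).drop ((lines.drop lineid).takeWhile (pvKeep separator)).length).drop 1 := by
        simp only [List.drop_drop]
      rw [hdd]
      simp
    · rw [if_neg h]
      have h0 : lines.drop lineid = [] := List.drop_eq_nil_of_le (by omega)
      rw [h0, pvGroups]
      simp

-- how B's final step combines a pending partial group with the groups of the rest
def pvGlue (cur : List String) : List (List String) → List (List String)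
  | [] => if cur = [] then [] else [cur]
  | g :: gs => (cur ++ g) :: gs

theorem pvGlue_nil (gs : List (List String)) : pvGlue [] gs = gs := by
  cases gs <;> simp [pvGlue]

-- appending a kept line to the pending group commutes with prepending it to the line list
theorem pvGlue_keep (separator l : String) (hk : pvKeep separator l = true)
    (cur : List String) (ls : List String) :
    pvGlue (cur ++ [PySem.Str.strip l]) (pvGroups separator ls)
      = pvGlue cur (pvGroups separator (l :: ls)) := by
  rw [pvGroups_cons]
  have ht : (l :: ls).takeWhile (pvKeep separator) = l :: ls.takeWhile (pvKeep separator) := by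
    simp [List.takeWhile_cons, hk]
  rw [ht]
  cases hls : ls with
  | nil => simp [pvGroups, pvGlue]
  | cons a as =>
    rw [pvGroups_cons]
    simp [pvGlue, List.drop_succ_cons]

-- B's fold from any reachable state (started = current ≠ []) finishes to pvGlue of the groups
theorem pvFoldB_eq (separator : String) (ls : List String) (res : List (List String))
    (cur : List String) :
    (let st := ls.foldl (pvStepB separator) (res, cur, decide (cur ≠ []))
     if st.2.2 then st.1 ++ [st.2.1] else st.1) = res ++ pvGlue cur (pvGroups separator ls) := by
  induction ls generalizing res cur with
  | nil =>
    by_cases hc : cur = [] <;> simp [pvGroups, pvGlue, hc]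
  | cons l ls ih =>
    by_cases hb : l = "" ∨ l = separator
    · have hk : pvKeep separator l = false := by
        rcases hb with hb | hb <;> simp [pvKeep, hb]
      have h0 : (decide (([] : List String) ≠ [])) = false := by decide
      simp only [List.foldl_cons, pvStepB, if_pos hb]
      have := ih (res ++ [cur]) []
      rw [h0] at this
      rw [this]
      rw [pvGroups_cons]
      simp only [List.takeWhile_cons, hk, if_neg, Bool.false_eq_true, List.length_nil,
        List.drop_zero, List.drop_one, List.map_nil]
      simp [pvGlue]
      cases pvGroups separator ls <;> simp [pvGlue]
    · have hk : pvKeep separator l = true := by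
        push_neg at hb
        simp [pvKeep, hb.1, hb.2]
      have hne : (decide ((cur ++ [PySem.Str.strip l]) ≠ [])) = true := by simp
      simp only [List.foldl_cons, pvStepB, if_neg hb]
      have := ih res (cur ++ [PySem.Str.strip l])
      rw [hne] at this
      rw [this, pvGlue_keep separator l hk]

-- ===== VERDICT (by name: the statement is the Claim_ definition above) =====
theorem get_arrays_from_separator_spec : Claim_equal_get_arrays_from_separator := by
  intro lines separator _
  unfold Spec_get_arrays_from_separator get_arrays_from_separator get_arrays_from_separator_alt
  rw [pvOuterA_eq _ _ _ _ _ (by omega)]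
  have := pvFoldB_eq separator lines [] []
  simp only [decide_eq_false (by simp : ¬ ([] : List String) ≠ [])] at this
  rw [this, pvGlue_nil]
  simp
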